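-- pv_equiv track=rewrite | github.com/pypi-data/pypi-mirror-308 | packages/clabtoolkit/clabtoolkit-0.3.0-py2.py3-none-any.whl/clabtoolkit/misctools.py | correct_names
-- ===== SOURCE A (Python) =====
-- def correct_names(regnames: list,
--                     prefix: str = None,
--                     sufix: str = None,
--                     lower: bool = False,
--                     remove: list = None,
--                     replace: list = None):
--
--     """
--     Correcting region names
--     @params:
--         regnames   - Required  : List of region names:
--         prefix     - Optional  : Add prefix to the region names:
--         sufix      - Optional  : Add sufix to the region names:
--         lower      - Optional  : Lower the region names. Default is False:
--         remove     - Optional  : Remove the substring item from the region names: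
--         replace    - Optional  : Replace the substring item from the region names:
--     """
--
--     # Add prefix to the region names
--     if prefix is not None:
--         # If temp_name do not starts with ctx- then add it
--         regnames = [
--             name if name.startswith(prefix) else prefix + "{}".format(name)
--             for name in regnames
--         ]
--
--     # Add sufix to the region names
--     if sufix is not None:
--         # If temp_name do not ends with - then add it
--         regnames = [
--             name if name.endswith(sufix) else "{}".format(name) + sufix
--             for name in regnames
--         ]
--
--     # Lower the region names
--     if lower:
--         regnames = [name.lower() for name in regnames]
--
--     # Remove the substring item from the region names
--     if remove is not None:
--
--         for item in remove:
--
--             # Remove the substring item from the region names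
--             regnames = [name.replace(item, "") for name in regnames]
--
--     # Replace the substring item from the region names
--     if replace is not None:
--
--             if isinstance(replace, list):
--                 if all(isinstance(item, list) for item in replace):
--                     for item in replace:
--                         # Replace the substring item from the region names
--                         regnames = [name.replace(item[0], item[1]) for name in regnames]
--                 else:
--                     regnames = [name.replace(replace[0], replace[1]) for name in regnames]
--
--     return regnames
-- ===== SOURCE B (Python) =====
-- def correct_names(regnames: list,
--                   prefix: str = None,
--                   sufix: str = None,
--                   lower: bool = False,
--                   remove: list = None,
--                   replace: list = None):
--     # Normalise the replace argument into a list of (old, new) pairs once.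
--     if isinstance(replace, list):
--         if all(isinstance(item, list) for item in replace):
--             pairs = [(item[0], item[1]) for item in replace]
--         else:
--             pairs = [(replace[0], replace[1])]
--     else:
--         pairs = []
--     removals = remove if remove is not None else []
--
--     def fix(name):
--         if prefix is not None and not name.startswith(prefix):
--             name = prefix + name
--         if sufix is not None and not name.endswith(sufix):
--             name = name + sufix
--         if lower:
--             name = name.lower()
--         for item in removals:
--             name = name.replace(item, "")
--         for old, new in pairs:
--             name = name.replace(old, new)
--         return name
--
--     return [fix(name) for name in regnames]
-- ===== Notes on version B (the rewrite author's own statement) =====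
-- stated objective: simpler
-- what changed: A rebuilds the whole list once per transform stage (one list pass per prefix/suffix/lower stage and per remove/replace item); B normalises replace into (old,new) pairs once and makes a single pass over the names, applying the full per-name pipeline in one helper.
-- outside the precondition, e.g. on correct_names([], None, None, False, None, [[]]): A returns [], B raises IndexError
import Mathlib
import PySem

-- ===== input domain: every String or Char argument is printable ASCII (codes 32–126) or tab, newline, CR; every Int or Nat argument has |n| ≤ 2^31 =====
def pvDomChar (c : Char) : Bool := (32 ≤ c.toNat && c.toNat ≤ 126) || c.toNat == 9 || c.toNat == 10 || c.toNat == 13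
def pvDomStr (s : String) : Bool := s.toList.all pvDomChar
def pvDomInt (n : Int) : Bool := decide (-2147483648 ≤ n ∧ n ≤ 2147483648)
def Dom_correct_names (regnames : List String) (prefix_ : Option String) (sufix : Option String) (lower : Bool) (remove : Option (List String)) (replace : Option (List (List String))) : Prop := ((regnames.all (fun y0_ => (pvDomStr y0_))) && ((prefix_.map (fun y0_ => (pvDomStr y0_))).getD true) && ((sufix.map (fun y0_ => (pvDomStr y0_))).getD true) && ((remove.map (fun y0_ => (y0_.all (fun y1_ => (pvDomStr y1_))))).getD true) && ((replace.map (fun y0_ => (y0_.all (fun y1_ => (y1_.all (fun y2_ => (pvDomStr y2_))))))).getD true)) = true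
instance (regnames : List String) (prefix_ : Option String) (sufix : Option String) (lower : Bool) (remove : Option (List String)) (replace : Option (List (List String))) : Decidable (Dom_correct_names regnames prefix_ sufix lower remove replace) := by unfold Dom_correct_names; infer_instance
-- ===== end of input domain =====

-- B fuses A's stage-by-stage list passes into one traversal with a per-name transform (simpler; same return value; neither mutates its arguments).


-- item[i] on a list of strings; Pre_ guarantees the index is in range, so the "" default is never used there
def pvIdxStr (item : List String) (i : Int) : String := (PySem.List.pyGet? item i).getD ""

-- ===== PORT A =====
-- literal transliteration of A: one full list pass per stage / per item; under the
-- declared type every element of `replace` is a list, so Python's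
-- `all(isinstance(item, list) for item in replace)` is always True and only that branch is ported
def correct_names (regnames : List String) (prefix_ : Option String) (sufix : Option String) (lower : Bool) (remove : Option (List String)) (replace : Option (List (List String))) : List String :=
  let r1 := match prefix_ with
    | none => regnames
    | some p => regnames.map (fun name => if PySem.Str.startswith name p then name else p ++ name)
  let r2 := match sufix with
    | none => r1
    | some s => r1.map (fun name => if PySem.Str.endswith name s then name else name ++ s)
  let r3 := if lower then r2.map (fun name => PySem.Str.lower name) else r2
  let r4 := match remove with
    | none => r3
    | some items => items.foldl (fun acc item => acc.map (fun name => PySem.Str.replace name item "")) r3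
  match replace with
  | none => r4
  | some items =>
      items.foldl (fun acc item => acc.map (fun name => PySem.Str.replace name (pvIdxStr item 0) (pvIdxStr item 1))) r4

-- ===== PORT B =====
-- per-name pipeline (Source B's `fix`)
def fixName (prefix_ : Option String) (sufix : Option String) (lower : Bool) (removals : List String) (pairs : List (String × String)) (name : String) : String :=
  let n1 := match prefix_ with
    | some p => if !PySem.Str.startswith name p then p ++ name else name
    | none => name
  let n2 := match sufix with
    | some s => if !PySem.Str.endswith n1 s then n1 ++ s else n1
    | none => n1
  let n3 := if lower then PySem.Str.lower n2 else n2
  let n4 := removals.foldl (fun n item => PySem.Str.replace n item "") n3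
  pairs.foldl (fun n pr => PySem.Str.replace n pr.1 pr.2) n4

def correct_names_alt (regnames : List String) (prefix_ : Option String) (sufix : Option String) (lower : Bool) (remove : Option (List String)) (replace : Option (List (List String))) : List String :=
  let pairs := match replace with
    | none => []
    | some items => items.map (fun item => (pvIdxStr item 0, pvIdxStr item 1))
  let removals := match remove with
    | none => []
    | some items => items
  regnames.map (fixName prefix_ sufix lower removals pairs)

-- ===== PRECONDITION & SPEC =====
-- Pre_ excludes the inputs where some replace item has fewer than 2 elements: Python A raises
-- IndexError there whenever regnames is non-empty, and when regnames is empty A returns [] while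
-- B (which normalises the replace pairs up front) raises IndexError.
def Pre_correct_names (regnames : List String) (prefix_ : Option String) (sufix : Option String) (lower : Bool) (remove : Option (List String)) (replace : Option (List (List String))) : Prop :=
  ∀ item ∈ replace.getD [], 2 ≤ item.length
instance (regnames : List String) (prefix_ : Option String) (sufix : Option String) (lower : Bool) (remove : Option (List String)) (replace : Option (List (List String))) : Decidable (Pre_correct_names regnames prefix_ sufix lower remove replace) := by unfold Pre_correct_names; infer_instance
def pvWitness_correct_names : List String × Option String × Option String × Bool × Option (List String) × Option (List (List String)) :=
  (["ctx-Left", "Right"], some "ctx-", some "-gm", true, some ["-"], some [["ctx", "CTX"]])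
def Spec_correct_names (regnames : List String) (prefix_ : Option String) (sufix : Option String) (lower : Bool) (remove : Option (List String)) (replace : Option (List (List String))) (out : List String) : Prop := out = correct_names_alt regnames prefix_ sufix lower remove replace
instance (regnames : List String) (prefix_ : Option String) (sufix : Option String) (lower : Bool) (remove : Option (List String)) (replace : Option (List (List String))) (out : List String) : Decidable (Spec_correct_names regnames prefix_ sufix lower remove replace out) := by unfold Spec_correct_names; infer_instance

-- ===== CLAIM (what is proved, stated in full; the proofs are below) =====
def Claim_equal_correct_names : Prop := ∀ (regnames : List String) (prefix_ : Option String) (sufix : Option String) (lower : Bool) (remove : Option (List String)) (replace : Option (List (List String))), Dom_correct_names regnames prefix_ sufix lower remove replace → Pre_correct_names regnames prefix_ sufix lower remove replace → Spec_correct_names regnames prefix_ sufix lower remove replace (correct_names regnames prefix_ sufix lower remove replace)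

-- ===== LEMMAS AND PROOFS =====
-- A guards with `if cond then keep else change`, B with `if !cond then change else keep`
theorem if_flip {α : Type} (c : Bool) (x y : α) : (if c = false then x else y) = if c = true then y else x := by
  cases c <;> rfl

-- A's stage loop (rebuild the list once per item) equals B's per-name fold
theorem foldl_map_comm {β : Type} (items : List β) (f : β → String → String) (xs : List String) :
    items.foldl (fun acc it => acc.map (fun n => f it n)) xs
      = xs.map (fun n => items.foldl (fun n it => f it n) n) := by
  induction items generalizing xs with
  | nil => simp
  | cons it rest ih => simp [List.foldl_cons, ih, List.map_map]

-- ===== VERDICT (by name: the statement is the Claim_ definition above) =====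
theorem correct_names_spec : Claim_equal_correct_names := by
  intro regnames prefix_ sufix lower remove replace _ _
  show correct_names regnames prefix_ sufix lower remove replace
      = correct_names_alt regnames prefix_ sufix lower remove replace
  unfold correct_names correct_names_alt fixName
  cases remove <;> cases replace <;>
    simp only [foldl_map_comm, List.foldl_map, List.map_map, List.foldl_nil] <;>
    cases prefix_ <;> cases sufix <;> cases lower <;>
    (try simp [List.map_map, Function.comp, if_flip]) <;>
    exact fun _ _ => rfl
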